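-- pv_equiv track=rewrite | github.com/zhiwei531/baseball-analysis | src/baseball_pose/pipeline/overlays.py | _preferred_overlay_conditions
-- ===== SOURCE A (Python) =====
-- def _preferred_overlay_conditions(condition_ids: list[str]) -> list[str]:
--     body_mask_smoothed = [
--         condition_id
--         for condition_id in condition_ids
--         if condition_id.startswith("body_prior_mask_roi") and condition_id.endswith("_smooth")
--     ]
--     if body_mask_smoothed:
--         return body_mask_smoothed
--     center_smoothed = [
--         condition_id
--         for condition_id in condition_ids
--         if condition_id.startswith("center_prior_roi") and condition_id.endswith("_smooth")
--     ]
--     if center_smoothed: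
--         return center_smoothed
--     smoothed_roi = [
--         condition_id
--         for condition_id in condition_ids
--         if condition_id.endswith("_smooth") and "roi" in condition_id
--     ]
--     if smoothed_roi:
--         return smoothed_roi
--     smoothed = [condition_id for condition_id in condition_ids if condition_id.endswith("_smooth")]
--     return smoothed if smoothed else condition_ids
-- ===== SOURCE B (Python) =====
-- def _preferred_overlay_conditions(condition_ids: list[str]) -> list[str]:
--     buckets = ([], [], [], [])
--     for cid in condition_ids:
--         smooth = cid.endswith("_smooth")
--         if smooth and cid.startswith("body_prior_mask_roi"):
--             buckets[0].append(cid)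
--         if smooth and cid.startswith("center_prior_roi"):
--             buckets[1].append(cid)
--         if smooth and "roi" in cid:
--             buckets[2].append(cid)
--         if smooth:
--             buckets[3].append(cid)
--     for bucket in buckets:
--         if bucket:
--             return bucket
--     return condition_ids
-- ===== Notes on version B (the rewrite author's own statement) =====
-- stated objective: alternative
-- what changed: Replaces A's four sequential list comprehensions (up to four passes over the list) with a single pass that appends each id to every matching tier bucket, then returns the first non-empty bucket in priority order.
import Mathlib
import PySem

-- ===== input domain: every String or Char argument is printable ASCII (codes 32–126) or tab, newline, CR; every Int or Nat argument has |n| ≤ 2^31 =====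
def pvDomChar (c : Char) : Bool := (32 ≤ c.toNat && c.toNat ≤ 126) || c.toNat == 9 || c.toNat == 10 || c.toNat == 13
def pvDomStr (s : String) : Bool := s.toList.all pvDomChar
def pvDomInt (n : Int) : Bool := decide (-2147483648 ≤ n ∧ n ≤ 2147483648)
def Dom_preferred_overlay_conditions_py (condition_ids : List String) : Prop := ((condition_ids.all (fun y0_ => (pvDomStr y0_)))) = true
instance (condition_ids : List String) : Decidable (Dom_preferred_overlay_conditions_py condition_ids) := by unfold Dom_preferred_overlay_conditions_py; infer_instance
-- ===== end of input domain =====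

-- B replaces A's four sequential comprehensions with a single pass maintaining four tier buckets (alternative decomposition, same cost).

-- ===== PORT A =====
def preferred_overlay_conditions_py (condition_ids : List String) : List String :=
  let body_mask_smoothed := condition_ids.filter (fun cid =>
    PySem.Str.startswith cid "body_prior_mask_roi" && PySem.Str.endswith cid "_smooth")
  if body_mask_smoothed.isEmpty then
    let center_smoothed := condition_ids.filter (fun cid =>
      PySem.Str.startswith cid "center_prior_roi" && PySem.Str.endswith cid "_smooth")
    if center_smoothed.isEmpty then
      let smoothed_roi := condition_ids.filter (fun cid =>
        PySem.Str.endswith cid "_smooth" && PySem.Str.isIn "roi" cid)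
      if smoothed_roi.isEmpty then
        let smoothed := condition_ids.filter (fun cid => PySem.Str.endswith cid "_smooth")
        if smoothed.isEmpty then condition_ids else smoothed
      else smoothed_roi
    else center_smoothed
  else body_mask_smoothed

-- ===== PORT B =====
def pvStep (acc : List String × List String × List String × List String) (cid : String) :
    List String × List String × List String × List String :=
  let smooth := PySem.Str.endswith cid "_smooth"
  let acc := if smooth && PySem.Str.startswith cid "body_prior_mask_roi" then
    (acc.1 ++ [cid], acc.2.1, acc.2.2.1, acc.2.2.2) else acc
  let acc := if smooth && PySem.Str.startswith cid "center_prior_roi" then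
    (acc.1, acc.2.1 ++ [cid], acc.2.2.1, acc.2.2.2) else acc
  let acc := if smooth && PySem.Str.isIn "roi" cid then
    (acc.1, acc.2.1, acc.2.2.1 ++ [cid], acc.2.2.2) else acc
  if smooth then (acc.1, acc.2.1, acc.2.2.1, acc.2.2.2 ++ [cid]) else acc

def preferred_overlay_conditions_py_alt (condition_ids : List String) : List String :=
  let bs := condition_ids.foldl pvStep ([], [], [], [])
  if !bs.1.isEmpty then bs.1
  else if !bs.2.1.isEmpty then bs.2.1
  else if !bs.2.2.1.isEmpty then bs.2.2.1
  else if !bs.2.2.2.isEmpty then bs.2.2.2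
  else condition_ids

-- ===== PRECONDITION & SPEC =====
def Spec_preferred_overlay_conditions_py (condition_ids : List String) (out : List String) : Prop := out = preferred_overlay_conditions_py_alt condition_ids
instance (condition_ids : List String) (out : List String) : Decidable (Spec_preferred_overlay_conditions_py condition_ids out) := by unfold Spec_preferred_overlay_conditions_py; infer_instance

-- ===== CLAIM (what is proved, stated in full; the proofs are below) =====
def Claim_equal_preferred_overlay_conditions_py : Prop := ∀ (condition_ids : List String), Dom_preferred_overlay_conditions_py condition_ids → Spec_preferred_overlay_conditions_py condition_ids (preferred_overlay_conditions_py condition_ids)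

-- ===== LEMMAS AND PROOFS =====

theorem pvFoldl_buckets (xs : List String) (a b c d : List String) :
    xs.foldl pvStep (a, b, c, d) =
      (a ++ xs.filter (fun cid => PySem.Str.endswith cid "_smooth" && PySem.Str.startswith cid "body_prior_mask_roi"),
       b ++ xs.filter (fun cid => PySem.Str.endswith cid "_smooth" && PySem.Str.startswith cid "center_prior_roi"),
       c ++ xs.filter (fun cid => PySem.Str.endswith cid "_smooth" && PySem.Str.isIn "roi" cid),
       d ++ xs.filter (fun cid => PySem.Str.endswith cid "_smooth")) := by
  induction xs generalizing a b c d with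
  | nil => simp
  | cons x xs ih =>
    simp only [List.foldl_cons, List.filter_cons, pvStep]
    split_ifs <;> simp_all

set_option maxHeartbeats 1000000 in
theorem preferred_overlay_eq (condition_ids : List String) :
    preferred_overlay_conditions_py condition_ids = preferred_overlay_conditions_py_alt condition_ids := by
  simp only [preferred_overlay_conditions_py, preferred_overlay_conditions_py_alt, pvFoldl_buckets]
  simp only [List.nil_append]
  have hc : ∀ (p q : String → Bool), condition_ids.filter (fun cid => p cid && q cid)
      = condition_ids.filter (fun cid => q cid && p cid) := by
    intro p q; apply List.filter_congr; intro x _; exact Bool.and_comm _ _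
  rw [hc (fun cid => PySem.Str.startswith cid "body_prior_mask_roi") (fun cid => PySem.Str.endswith cid "_smooth"),
      hc (fun cid => PySem.Str.startswith cid "center_prior_roi") (fun cid => PySem.Str.endswith cid "_smooth")]
  by_cases h1 : (condition_ids.filter (fun cid => PySem.Str.endswith cid "_smooth" && PySem.Str.startswith cid "body_prior_mask_roi")).isEmpty <;>
  by_cases h2 : (condition_ids.filter (fun cid => PySem.Str.endswith cid "_smooth" && PySem.Str.startswith cid "center_prior_roi")).isEmpty <;>
  by_cases h3 : (condition_ids.filter (fun cid => PySem.Str.endswith cid "_smooth" && PySem.Str.isIn "roi" cid)).isEmpty <;>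
  by_cases h4 : (condition_ids.filter (fun cid => PySem.Str.endswith cid "_smooth")).isEmpty <;>
  simp_all

-- ===== VERDICT (by name: the statement is the Claim_ definition above) =====
theorem preferred_overlay_conditions_py_spec : Claim_equal_preferred_overlay_conditions_py := by
  intro condition_ids _
  unfold Spec_preferred_overlay_conditions_py
  exact preferred_overlay_eq condition_ids
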